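-- pv_equiv track=rewrite | github.com/alexander-xerxes-grant/advent-of-code | src/application/checksum.py | box_checksum_calculator
-- ===== SOURCE A (Python) =====
-- from typing import List
--
-- def box_checksum_calculator(box_ids: List) -> int:
--     """Check for unique occurrences of pairs and triplets in box ids."""
--     count_of_pairs = 0
--     count_of_triplets = 0
--
--     for id in box_ids:
--         character_count_dict = {
--             character: id.count(character) for character in id
--         }
--         if 2 in character_count_dict.values():
--             count_of_pairs += 1
--         if 3 in character_count_dict.values():
--             count_of_triplets += 1
--
--     return count_of_pairs * count_of_triplets
-- ===== SOURCE B (Python) =====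
-- def box_checksum_calculator(box_ids) -> int:
--     """Check for unique occurrences of pairs and triplets in box ids."""
--     count_of_pairs = 0
--     count_of_triplets = 0
--
--     for box_id in box_ids:
--         s = sorted(box_id)
--         has_pair = False
--         has_triplet = False
--         i = 0
--         n = len(s)
--         while i < n:
--             j = i
--             while j < n and s[j] == s[i]:
--                 j += 1
--             if j - i == 2:
--                 has_pair = True
--             if j - i == 3:
--                 has_triplet = True
--             i = j
--         count_of_pairs += has_pair
--         count_of_triplets += has_triplet
--
--     return count_of_pairs * count_of_triplets
-- ===== Notes on version B (the rewrite author's own statement) =====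
-- stated objective: alternative
-- what changed: Replaces the per-id frequency dict built with a str.count comprehension by sorting each id's characters and scanning the sorted list once, flagging runs of length exactly 2 and 3.
import Mathlib
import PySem

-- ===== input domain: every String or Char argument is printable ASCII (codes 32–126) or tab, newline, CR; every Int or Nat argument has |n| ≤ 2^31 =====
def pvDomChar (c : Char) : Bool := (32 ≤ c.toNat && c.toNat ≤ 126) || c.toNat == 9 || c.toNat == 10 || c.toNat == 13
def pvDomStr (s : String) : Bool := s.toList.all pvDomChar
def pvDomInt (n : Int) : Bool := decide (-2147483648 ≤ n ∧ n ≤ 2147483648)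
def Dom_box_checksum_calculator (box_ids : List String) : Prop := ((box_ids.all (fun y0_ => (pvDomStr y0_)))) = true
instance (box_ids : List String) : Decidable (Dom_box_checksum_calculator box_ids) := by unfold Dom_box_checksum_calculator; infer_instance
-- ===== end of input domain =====

-- B replaces A's per-id frequency dict (quadratic str.count comprehension) by a
-- sort-then-run-length scan of each id; same return value on every input.


-- ===== PORT A =====
-- the dict comprehension {character: id.count(character) for character in id}
def pvCountDict (cs : List Char) : PySem.Dict Char Int :=
  cs.foldl (fun d c => d.insert c ((cs.count c : Int))) PySem.Dict.empty

def box_checksum_calculator (box_ids : List String) : Int :=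
  let r := box_ids.foldl (fun (acc : Int × Int) id =>
    let d := pvCountDict id.toList
    let pairs := if (2 : Int) ∈ d.values then acc.1 + 1 else acc.1
    let triplets := if (3 : Int) ∈ d.values then acc.2 + 1 else acc.2
    (pairs, triplets)) (0, 0)
  r.1 * r.2

-- ===== PORT B =====
-- the inner while loops: advance j over the run of s[i], flag run lengths 2 and 3
def pvRunScan : List Char → Bool × Bool
  | [] => (false, false)
  | c :: rest =>
    let k := 1 + (rest.takeWhile (· == c)).length
    let r := pvRunScan (rest.dropWhile (· == c))
    (r.1 || k == 2, r.2 || k == 3)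
termination_by l => l.length
decreasing_by
  simp only [List.length_cons]
  exact Nat.lt_succ_of_le (List.length_dropWhile_le _ _)

def box_checksum_calculator_alt (box_ids : List String) : Int :=
  let r := box_ids.foldl (fun (acc : Int × Int) box_id =>
    let s := PySem.List.sorted box_id.toList (fun c => c) false
    let f := pvRunScan s
    (acc.1 + (if f.1 then 1 else 0), acc.2 + (if f.2 then 1 else 0))) (0, 0)
  r.1 * r.2

-- ===== PRECONDITION & SPEC =====
def Spec_box_checksum_calculator (box_ids : List String) (out : Int) : Prop := out = box_checksum_calculator_alt box_ids
instance (box_ids : List String) (out : Int) : Decidable (Spec_box_checksum_calculator box_ids out) := by unfold Spec_box_checksum_calculator; infer_instance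

-- ===== CLAIM (what is proved, stated in full; the proofs are below) =====
def Claim_equal_box_checksum_calculator : Prop := ∀ (box_ids : List String), Dom_box_checksum_calculator box_ids → Spec_box_checksum_calculator box_ids (box_checksum_calculator box_ids)

-- ===== LEMMAS AND PROOFS =====

-- A's dict maps each character of cs to its count in cs
lemma getD_pvCountDict (cs : List Char) (c : Char) (hc : c ∈ cs) :
    (pvCountDict cs).getD c 0 = (cs.count c : Int) := by
  suffices h : ∀ (l : List Char) (d : PySem.Dict Char Int),
      (l.foldl (fun d c => d.insert c ((cs.count c : Int))) d).getD c 0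
        = if c ∈ l then (cs.count c : Int) else d.getD c 0 by
    simpa [pvCountDict, hc] using h cs PySem.Dict.empty
  intro l
  induction l using List.reverseRecOn with
  | nil => simp
  | append_singleton l x ih =>
    intro d
    simp only [List.foldl_append, List.foldl_cons, List.foldl_nil,
      PySem.Dict.getD_insert, ih, List.mem_append, List.mem_singleton]
    by_cases hx : c = x <;> by_cases hl : c ∈ l <;> simp [hx, hl]

lemma keys_pvCountDict (cs : List Char) :
    (pvCountDict cs).keys = PySem.Set.ofList cs := by
  simpa [pvCountDict] using
    (PySem.Dict.keys_foldl_insert cs (fun d c => (cs.count c : Int)) PySem.Dict.empty)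

lemma nodup_keys_pvCountDict (cs : List Char) : (pvCountDict cs).keys.Nodup := by
  rw [keys_pvCountDict]; exact PySem.Set.nodup_ofList cs

-- membership in A's dict values = some character has that count
lemma mem_values_pvCountDict (cs : List Char) (v : Int) :
    v ∈ (pvCountDict cs).values ↔ ∃ c ∈ cs, (cs.count c : Int) = v := by
  rw [PySem.Dict.values_eq_map_keys (pvCountDict cs) (nodup_keys_pvCountDict cs) 0,
    keys_pvCountDict]
  simp only [List.mem_map]
  constructor
  · rintro ⟨c, hc, hv⟩
    have hc' : c ∈ cs := (PySem.Set.mem_ofList _ _).1 hc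
    exact ⟨c, hc', by rw [← getD_pvCountDict cs c hc']; exact hv⟩
  · rintro ⟨c, hc, hv⟩
    exact ⟨c, (PySem.Set.mem_ofList _ _).2 hc, by rw [getD_pvCountDict cs c hc]; exact hv⟩

lemma not_mem_dropWhile_of_sorted (c : Char) :
    ∀ l : List Char, l.Pairwise (· ≤ ·) → (∀ y ∈ l, c ≤ y) →
      c ∉ l.dropWhile (· == c) := by
  intro l
  induction l with
  | nil => simp
  | cons y r ih =>
    intro hp hle
    by_cases hy : y = c
    · subst hy
      rw [List.dropWhile_cons_of_pos (by simp)]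
      exact ih (List.Pairwise.of_cons hp) (fun z hz => (List.pairwise_cons.1 hp).1 z hz)
    · rw [List.dropWhile_cons_of_neg (by simp [hy])]
      intro hmem
      rcases List.mem_cons.1 hmem with h | h
      · exact hy h.symm
      · have h1 : c ≤ y := hle y (List.mem_cons_self)
        have h2 : y ≤ c := (List.pairwise_cons.1 hp).1 c h
        exact hy (le_antisymm h2 h1)

-- the run scan over a sorted list finds exactly the characters whose count is 2 (resp. 3)
lemma pvRunScan_spec : ∀ (n : Nat) (l : List Char), l.length ≤ n → l.Pairwise (· ≤ ·) →
    (((pvRunScan l).1 = true ↔ ∃ x ∈ l, l.count x = 2) ∧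
     ((pvRunScan l).2 = true ↔ ∃ x ∈ l, l.count x = 3)) := by
  intro n
  induction n with
  | zero =>
    intro l hl _
    have : l = [] := List.length_eq_zero_iff.1 (Nat.le_zero.1 hl)
    subst this
    simp [pvRunScan]
  | succ n ih =>
    intro l hl hp
    match l with
    | [] => simp [pvRunScan]
    | c :: rest =>
      set t := rest.takeWhile (· == c) with ht_def
      set d := rest.dropWhile (· == c) with hd_def
      have hsplit : t ++ d = rest := List.takeWhile_append_dropWhile
      have ht : ∀ x ∈ t, x = c := by
        intro x hx
        rw [ht_def] at hx
        exact eq_of_beq (List.mem_takeWhile_imp (p := fun y => y == c) (l := rest) hx)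
      have hprest : rest.Pairwise (· ≤ ·) := List.Pairwise.of_cons hp
      have hcle : ∀ y ∈ rest, c ≤ y := (List.pairwise_cons.1 hp).1
      have hcd : c ∉ d := not_mem_dropWhile_of_sorted c rest hprest hcle
      have hdp : d.Pairwise (· ≤ ·) := hprest.sublist (List.dropWhile_sublist _)
      have hdlen : d.length ≤ n := by
        have h1 : d.length ≤ rest.length := List.length_dropWhile_le _ _
        have h2 : rest.length + 1 ≤ n + 1 := by simpa using hl
        omega
      have IH := ih d hdlen hdp
      have hct : t.count c = t.length := List.count_eq_length.2 (fun b hb => (ht b hb).symm)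
      have hcc : (c :: rest).count c = 1 + t.length := by
        rw [← hsplit]
        simp [List.count_append, List.count_eq_zero.2 hcd, hct]
        omega
      have hxc : ∀ x, x ≠ c → (c :: rest).count x = d.count x := by
        intro x hx
        have hxt : t.count x = 0 := List.count_eq_zero.2 (fun hxt => hx (ht x hxt))
        have hcx : ¬ c = x := fun h => hx h.symm
        rw [← hsplit]
        simp [List.count_append, hxt, hcx]
      have key : ∀ k : Nat, ((∃ x ∈ c :: rest, (c :: rest).count x = k) ↔
          (1 + t.length = k ∨ ∃ x ∈ d, d.count x = k)) := by
        intro k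
        constructor
        · rintro ⟨x, hx, hcnt⟩
          by_cases hxeq : x = c
          · subst hxeq; left; rw [← hcc]; exact hcnt
          · right
            have hxrest : x ∈ rest := List.mem_cons.1 hx |>.resolve_left hxeq
            have hxd : x ∈ d := by
              rcases List.mem_append.1 (hsplit ▸ hxrest) with h | h
              · exact absurd (ht x h) hxeq
              · exact h
            exact ⟨x, hxd, by rw [← hxc x hxeq]; exact hcnt⟩
        · rintro (h | ⟨x, hx, hcnt⟩)
          · exact ⟨c, List.mem_cons_self, by rw [hcc]; exact h⟩
          · have hxne : x ≠ c := fun he => hcd (he ▸ hx)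
            have hxl : x ∈ c :: rest := by
              rw [← hsplit]
              exact List.mem_cons_of_mem _ (List.mem_append_right _ hx)
            exact ⟨x, hxl, by rw [hxc x hxne]; exact hcnt⟩
      have hscan : pvRunScan (c :: rest) =
          ((pvRunScan d).1 || (1 + t.length == 2), (pvRunScan d).2 || (1 + t.length == 3)) := by
        rw [pvRunScan]
      rw [hscan]
      constructor
      · simp only [Bool.or_eq_true, beq_iff_eq, IH.1, key 2]
        exact or_comm
      · simp only [Bool.or_eq_true, beq_iff_eq, IH.2, key 3]
        exact or_comm

-- per-id agreement of A's "2 in values" test with B's pair flag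
lemma perId2 (cs : List Char) :
    ((2 : Int) ∈ (pvCountDict cs).values ↔
      (pvRunScan (PySem.List.sorted cs (fun c => c) false)).1 = true) := by
  set sl := PySem.List.sorted cs (fun c => c) false with hsl
  have hperm : sl.Perm cs := PySem.List.sorted_perm cs (fun c => c) false
  have hpw : sl.Pairwise (· ≤ ·) := PySem.List.sorted_pairwise cs (fun c => c)
  have hspec := (pvRunScan_spec sl.length sl le_rfl hpw).1
  rw [mem_values_pvCountDict, hspec]
  constructor
  · rintro ⟨c, hc, hv⟩
    exact ⟨c, hperm.mem_iff.2 hc, by rw [hperm.count_eq]; exact_mod_cast hv⟩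
  · rintro ⟨c, hc, hv⟩
    rw [hperm.count_eq] at hv
    exact ⟨c, hperm.mem_iff.1 hc, by exact_mod_cast hv⟩

-- per-id agreement of A's "3 in values" test with B's triplet flag
lemma perId3 (cs : List Char) :
    ((3 : Int) ∈ (pvCountDict cs).values ↔
      (pvRunScan (PySem.List.sorted cs (fun c => c) false)).2 = true) := by
  set sl := PySem.List.sorted cs (fun c => c) false with hsl
  have hperm : sl.Perm cs := PySem.List.sorted_perm cs (fun c => c) false
  have hpw : sl.Pairwise (· ≤ ·) := PySem.List.sorted_pairwise cs (fun c => c)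
  have hspec := (pvRunScan_spec sl.length sl le_rfl hpw).2
  rw [mem_values_pvCountDict, hspec]
  constructor
  · rintro ⟨c, hc, hv⟩
    exact ⟨c, hperm.mem_iff.2 hc, by rw [hperm.count_eq]; exact_mod_cast hv⟩
  · rintro ⟨c, hc, hv⟩
    rw [hperm.count_eq] at hv
    exact ⟨c, hperm.mem_iff.1 hc, by exact_mod_cast hv⟩

-- ===== VERDICT (by name: the statement is the Claim_ definition above) =====
theorem box_checksum_calculator_spec : Claim_equal_box_checksum_calculator := by
  intro box_ids _
  unfold Spec_box_checksum_calculator box_checksum_calculator box_checksum_calculator_alt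
  have hstep : (fun (acc : Int × Int) (id : String) =>
      let d := pvCountDict id.toList
      let pairs := if (2 : Int) ∈ d.values then acc.1 + 1 else acc.1
      let triplets := if (3 : Int) ∈ d.values then acc.2 + 1 else acc.2
      (pairs, triplets)) =
      (fun (acc : Int × Int) (box_id : String) =>
      let s := PySem.List.sorted box_id.toList (fun c => c) false
      let f := pvRunScan s
      (acc.1 + (if f.1 then 1 else 0), acc.2 + (if f.2 then 1 else 0))) := by
    funext acc id
    have h2 := perId2 id.toList
    have h3 := perId3 id.toList
    simp only []
    by_cases hA : (2 : Int) ∈ (pvCountDict id.toList).values <;>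
      by_cases hB : (3 : Int) ∈ (pvCountDict id.toList).values
    · simp [hA, hB, h2.1 hA, h3.1 hB]
    · simp [hA, hB, h2.1 hA, Bool.eq_false_iff.2 (fun h => hB (h3.2 h))]
    · simp [hA, hB, Bool.eq_false_iff.2 (fun h => hA (h2.2 h)), h3.1 hB]
    · simp [hA, hB, Bool.eq_false_iff.2 (fun h => hA (h2.2 h)),
        Bool.eq_false_iff.2 (fun h => hB (h3.2 h))]
  rw [hstep]
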